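-- pv_equiv track=rewrite | github.com/shubhamShandilya414/NTTCVFORMATTER | app.py | parse_input_cv_sections
-- ===== SOURCE A (Python) =====
-- def parse_input_cv_sections(full_text: str) -> list:
--     """
--     Heuristic section splitter for raw CV text.
--     Looks for lines that are likely section headings.
--     """
--     lines = full_text.split("\n")
--     sections = []
--     current = None
--     heading_keywords = {
--         # Summary / Objective
--         "objective", "summary", "profile", "professional summary",
--         "profile summary", "career objective", "job objective",
--         "career summary", "executive summary", "about me",
--         # Experience
--         "experience", "work experience", "professional experience",
--         "employment", "work history", "detailed experience",
--         "previous work experience", "key result areas",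
--         "employment history", "career history",
--         # Education
--         "education", "qualifications", "academic qualifications",
--         "academic background",
--         # Skills
--         "skills", "technical skills", "it skills", "key skills",
--         "core skills", "tools and technologies",
--         # Competencies (CRITICAL: these were being missed)
--         "competencies", "core competencies", "technical competencies",
--         "key competencies", "functional competencies",
--         # Soft Skills (CRITICAL: was being missed)
--         "soft skills", "interpersonal skills", "behavioral skills",
--         # Achievements (CRITICAL: was being missed)
--         "achievements", "key achievements", "accomplishments",
--         "awards", "honors", "recognition", "awards and achievements",
--         # Certifications
--         "certifications", "training", "training & certification",
--         "training and certification", "licenses", "credentials",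
--         "professional certifications",
--         # Projects
--         "projects", "key projects",
--         # Specializations
--         "specializations", "specializations & implementations",
--         # Others
--         "publications", "references", "languages", "hobbies",
--         "interests", "contact", "contact details", "personal",
--         "personal details", "additional information",
--     }
--
--     for line in lines:
--         stripped = line.strip()
--         if not stripped:
--             continue
--
--         is_heading = False
--         lower = stripped.lower().rstrip(":")
--         # Direct match against known headings
--         if lower in heading_keywords:
--             is_heading = True
--         # ALL CAPS short text (e.g., "WORK EXPERIENCE", "CORE COMPETENCIES")
--         elif stripped.isupper() and 2 < len(stripped) < 60 and len(stripped.split()) <= 7: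
--             is_heading = True
--         # Title Case multi-word known heading (e.g., "Professional Summary:")
--         elif lower in heading_keywords:
--             is_heading = True
--         # Fuzzy: check if any known keyword is a substring (e.g., "Key Achievements & Awards")
--         elif not is_heading and len(stripped.split()) <= 7:
--             for kw in heading_keywords:
--                 if kw in lower and len(lower) < 50:
--                     is_heading = True
--                     break
--
--         if is_heading:
--             if current:
--                 sections.append(current)
--             current = {"heading": stripped.rstrip(":"), "content": ""}
--         else:
--             if current is None:
--                 current = {"heading": "__HEADER__", "content": ""}
--             current["content"] += stripped + "\n"
--
--     if current:
--         sections.append(current)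
--     return sections
-- ===== SOURCE B (Python) =====
-- HEADING_KEYWORDS = frozenset([
--     "about me", "academic background", "academic qualifications", "accomplishments",
--     "achievements", "additional information", "awards", "awards and achievements",
--     "behavioral skills", "career history", "career objective", "career summary",
--     "certifications", "competencies", "contact", "contact details", "core competencies",
--     "core skills", "credentials", "detailed experience", "education", "employment",
--     "employment history", "executive summary", "experience", "functional competencies",
--     "hobbies", "honors", "interests", "interpersonal skills", "it skills",
--     "job objective", "key achievements", "key competencies", "key projects",
--     "key result areas", "key skills", "languages", "licenses", "objective",
--     "personal", "personal details", "previous work experience",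
--     "professional certifications", "professional experience", "professional summary",
--     "profile", "profile summary", "projects", "publications", "qualifications",
--     "recognition", "references", "skills", "soft skills", "specializations",
--     "specializations & implementations", "summary", "technical competencies",
--     "technical skills", "tools and technologies", "training",
--     "training & certification", "training and certification", "work experience",
--     "work history",
-- ])
--
--
-- def _is_heading(stripped: str) -> bool:
--     lower = stripped.lower().rstrip(":")
--     if lower in HEADING_KEYWORDS:
--         return True
--     if stripped.isupper() and 2 < len(stripped) < 60 and len(stripped.split()) <= 7:
--         return True
--     if len(stripped.split()) <= 7:
--         return any(kw in lower and len(lower) < 50 for kw in HEADING_KEYWORDS)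
--     return False
--
--
-- def _span(lines):
--     """Split lines into (maximal heading-free prefix, remainder)."""
--     for i, s in enumerate(lines):
--         if _is_heading(s):
--             return lines[:i], lines[i:]
--     return lines, []
--
--
-- def _section(heading, body):
--     return {"heading": heading, "content": "".join(s + "\n" for s in body)}
--
--
-- def parse_input_cv_sections(full_text: str) -> list:
--     # Parser-style consumption: repeatedly cut the remaining lines at the next
--     # heading boundary and emit one section per chunk.
--     lines = [ln.strip() for ln in full_text.split("\n") if ln.strip()]
--     body, rest = _span(lines)
--     sections = [_section("__HEADER__", body)] if body else []
--     while rest: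
--         head, tail = rest[0], rest[1:]
--         body, rest = _span(tail)
--         sections.append(_section(head.rstrip(":"), body))
--     return sections
-- ===== Notes on version B (the rewrite author's own statement) =====
-- stated objective: alternative
-- what changed: A streams line-by-line updating a mutable current-section dict; B is a parser-style consumer: it strips/filters the lines once, then repeatedly cuts the remaining list at the next heading boundary with a span helper (maximal heading-free prefix + remainder) and emits one section per chunk, joining each chunk's content at once.
import Mathlib
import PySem

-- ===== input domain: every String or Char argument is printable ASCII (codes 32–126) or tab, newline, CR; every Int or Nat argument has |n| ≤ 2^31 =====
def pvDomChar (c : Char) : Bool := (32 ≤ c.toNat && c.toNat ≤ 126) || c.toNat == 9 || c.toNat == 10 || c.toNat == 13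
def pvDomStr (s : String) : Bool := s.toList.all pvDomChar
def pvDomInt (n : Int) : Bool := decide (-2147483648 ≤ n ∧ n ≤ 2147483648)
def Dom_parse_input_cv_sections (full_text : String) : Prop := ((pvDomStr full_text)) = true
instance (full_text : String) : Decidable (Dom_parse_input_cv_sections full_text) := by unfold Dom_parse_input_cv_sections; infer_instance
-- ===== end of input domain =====

-- B replaces A's line-by-line accumulate loop (mutable current dict) with a parser-style
-- consumer that repeatedly cuts the stripped line list at the next heading boundary
-- (span = maximal heading-free prefix) and emits one section per chunk; objective: alternative.

-- shared helpers (used verbatim by both Pythons' text tests)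

-- s.rstrip(":") — exact: drops every trailing ':' character
def pvRstripColon (s : String) : String :=
  String.ofList ((s.toList.reverse.dropWhile (· == ':')).reverse)

-- s.isupper() — exact on the ASCII domain (cased characters are exactly the letters):
-- at least one cased character and no lowercase one
def pvIsupper (s : String) : Bool :=
  s.toList.any (fun c => PySem.Chars.isupper c || PySem.Chars.islower c) &&
  !(s.toList.any PySem.Chars.islower)

-- ===== PORT A =====

-- A's heading_keywords is a Python set literal (66 distinct strings); it is only used for a
-- membership test and an any-style scan, both order-independent booleans, so a list in source
-- order is exact.
def pvKeywordsA : List String := ["objective",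
  "summary",
  "profile",
  "professional summary",
  "profile summary",
  "career objective",
  "job objective",
  "career summary",
  "executive summary",
  "about me",
  "experience",
  "work experience",
  "professional experience",
  "employment",
  "work history",
  "detailed experience",
  "previous work experience",
  "key result areas",
  "employment history",
  "career history",
  "education",
  "qualifications",
  "academic qualifications",
  "academic background",
  "skills",
  "technical skills",
  "it skills",
  "key skills",
  "core skills",
  "tools and technologies",
  "competencies",
  "core competencies",
  "technical competencies",
  "key competencies",
  "functional competencies",
  "soft skills",
  "interpersonal skills",
  "behavioral skills",
  "achievements",
  "key achievements",
  "accomplishments",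
  "awards",
  "honors",
  "recognition",
  "awards and achievements",
  "certifications",
  "training",
  "training & certification",
  "training and certification",
  "licenses",
  "credentials",
  "professional certifications",
  "projects",
  "key projects",
  "specializations",
  "specializations & implementations",
  "publications",
  "references",
  "languages",
  "hobbies",
  "interests",
  "contact",
  "contact details",
  "personal",
  "personal details",
  "additional information"]

def pvAStep (st : List (List (String × String)) × Option (PySem.Dict String String))
    (line : String) : List (List (String × String)) × Option (PySem.Dict String String) :=
  let stripped := PySem.Str.strip line
  if stripped.toList = [] then st
  else
    let lower := pvRstripColon (PySem.Str.lower stripped)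
    let is_heading :=
      if pvKeywordsA.contains lower then true
      else if pvIsupper stripped && decide (2 < PySem.Str.len stripped) &&
              decide (PySem.Str.len stripped < 60) &&
              decide ((PySem.Str.split₀ stripped).length ≤ 7) then true
      else if pvKeywordsA.contains lower then true  -- A's duplicated elif, kept verbatim
      else if decide ((PySem.Str.split₀ stripped).length ≤ 7) then
        -- for kw in heading_keywords: … break — only sets a bool, i.e. an any-scan
        pvKeywordsA.any (fun kw => PySem.Str.isIn kw lower && decide (PySem.Str.len lower < 50))
      else false
    if is_heading then
      ((match st.2 with      -- 'if current:' — a current dict is never empty, but kept literally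
        | some cur => if cur.items = [] then st.1 else st.1 ++ [cur.items]
        | none => st.1),
       some (PySem.Dict.ofList [("heading", pvRstripColon stripped), ("content", "")]))
    else
      let cur := match st.2 with
        | none => PySem.Dict.ofList [("heading", "__HEADER__"), ("content", "")]
        | some c => c
      -- current["content"] += stripped + "\n"  ("content" is always present, so the default is inert)
      (st.1, some (PySem.Dict.modify cur "content" "" (fun v => v ++ stripped ++ "\n")))

def parse_input_cv_sections (full_text : String) : List (List (String × String)) :=
  let lines := (PySem.Str.split? full_text "\n").getD []   -- sep is non-empty, never none
  let st := lines.foldl pvAStep ([], none)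
  match st.2 with
  | some cur => if cur.items = [] then st.1 else st.1 ++ [cur.items]
  | none => st.1

-- ===== PORT B =====

-- B's HEADING_KEYWORDS frozenset, written in sorted order (same 66 strings)
def pvKeywordsB : List String := ["about me",
  "academic background",
  "academic qualifications",
  "accomplishments",
  "achievements",
  "additional information",
  "awards",
  "awards and achievements",
  "behavioral skills",
  "career history",
  "career objective",
  "career summary",
  "certifications",
  "competencies",
  "contact",
  "contact details",
  "core competencies",
  "core skills",
  "credentials",
  "detailed experience",
  "education",
  "employment",
  "employment history",
  "executive summary",
  "experience",
  "functional competencies",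
  "hobbies",
  "honors",
  "interests",
  "interpersonal skills",
  "it skills",
  "job objective",
  "key achievements",
  "key competencies",
  "key projects",
  "key result areas",
  "key skills",
  "languages",
  "licenses",
  "objective",
  "personal",
  "personal details",
  "previous work experience",
  "professional certifications",
  "professional experience",
  "professional summary",
  "profile",
  "profile summary",
  "projects",
  "publications",
  "qualifications",
  "recognition",
  "references",
  "skills",
  "soft skills",
  "specializations",
  "specializations & implementations",
  "summary",
  "technical competencies",
  "technical skills",
  "tools and technologies",
  "training",
  "training & certification",
  "training and certification",
  "work experience",
  "work history"]

def pvIsHeadingB (stripped : String) : Bool :=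
  let lower := pvRstripColon (PySem.Str.lower stripped)
  if pvKeywordsB.contains lower then true
  else if pvIsupper stripped && decide (2 < PySem.Str.len stripped) &&
          decide (PySem.Str.len stripped < 60) &&
          decide ((PySem.Str.split₀ stripped).length ≤ 7) then true
  else if decide ((PySem.Str.split₀ stripped).length ≤ 7) then
    pvKeywordsB.any (fun kw => PySem.Str.isIn kw lower && decide (PySem.Str.len lower < 50))
  else false

-- _span: for i, s in enumerate(lines): if heading: return lines[:i], lines[i:]; else lines, []
def pvSpan (lines : List String) : List String × List String :=
  match (PySem.List.enumerate lines).find? (fun p => pvIsHeadingB p.2) with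
  | some (i, _) => (PySem.List.slice lines none (some i), PySem.List.slice lines (some i) none)
  | none => (lines, [])

-- _section(heading, body)
def pvSection (heading : String) (body : List String) : List (String × String) :=
  [("heading", heading), ("content", PySem.Str.join "" (body.map (· ++ "\n")))]

-- needed by pvWhileRest's termination (cited in decreasing_by)
theorem pvSpan_snd_le (lines : List String) : (pvSpan lines).2.length ≤ lines.length := by
  unfold pvSpan
  cases hf : (PySem.List.enumerate lines).find? (fun p => pvIsHeadingB p.2) with
  | none => simp
  | some p =>
    obtain ⟨i, s⟩ := p
    simp [PySem.List.slice_some_none]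

-- the while-loop over the remainder: rest[0] is the section heading, span(rest[1:]) its body
def pvWhileRest : List String → List (List (String × String))
  | [] => []
  | head :: tail =>
    pvSection (pvRstripColon head) (pvSpan tail).1 :: pvWhileRest (pvSpan tail).2
termination_by rest => rest.length
decreasing_by exact Nat.lt_succ_of_le (pvSpan_snd_le tail)

def parse_input_cv_sections_alt (full_text : String) : List (List (String × String)) :=
  let lines := (((PySem.Str.split? full_text "\n").getD []).filter
      (fun l => !((PySem.Str.strip l).toList.isEmpty))).map PySem.Str.strip
  let p := pvSpan lines
  (if !p.1.isEmpty then [pvSection "__HEADER__" p.1] else []) ++ pvWhileRest p.2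

-- ===== PRECONDITION & SPEC =====

def Spec_parse_input_cv_sections (full_text : String) (out : List (List (String × String))) : Prop :=
  out = parse_input_cv_sections_alt full_text

instance (full_text : String) (out : List (List (String × String))) :
    Decidable (Spec_parse_input_cv_sections full_text out) := by
  unfold Spec_parse_input_cv_sections; infer_instance

-- ===== CLAIM =====

def Claim_equal_parse_input_cv_sections : Prop :=
  ∀ (full_text : String), Dom_parse_input_cv_sections full_text →
    Spec_parse_input_cv_sections full_text (parse_input_cv_sections full_text)

-- ===== LEMMAS AND PROOFS =====

theorem pvKw_perm : pvKeywordsA.Perm pvKeywordsB := by decide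

theorem pvContains_eq (s : String) : pvKeywordsA.contains s = pvKeywordsB.contains s :=
  List.Perm.contains_eq pvKw_perm

theorem pvAny_eq (f : String → Bool) : pvKeywordsA.any f = pvKeywordsB.any f :=
  List.Perm.any_eq pvKw_perm

-- String.ofList-level characterisation of "".join
theorem pvJoin_eq (l : List String) :
    PySem.Str.join "" l = String.ofList (l.map String.toList).flatten := by
  have h : ∀ m : List (List Char), ([] : List Char).intercalate m = m.flatten := by
    intro m
    induction m with
    | nil => simp [List.intercalate]
    | cons a t ih => cases t <;> simp_all [List.intercalate, List.intersperse]
  simp [PySem.Str.join, PySem.Chars.join, h]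

theorem pvJoin_snoc (c : List String) (x : String) :
    PySem.Str.join "" (c ++ [x]) = PySem.Str.join "" c ++ x := by
  simp [pvJoin_eq, String.ofList_append, String.ofList_toList]

theorem pvJoin_singleton (x : String) : PySem.Str.join "" [x] = x := by
  simp [pvJoin_eq, String.ofList_toList]

theorem pvItems_ofList (H C : String) :
    (PySem.Dict.ofList [("heading", H), ("content", C)]).items
    = [("heading", H), ("content", C)] := by
  simp [PySem.Dict.ofList, PySem.Dict.empty, PySem.Dict.update, PySem.Dict.insert,
        PySem.Dict.contains]

theorem pvModify_content (H C : String) (f : String → String) :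
    PySem.Dict.modify (PySem.Dict.ofList [("heading", H), ("content", C)]) "content" "" f
    = PySem.Dict.ofList [("heading", H), ("content", f C)] := by
  simp [PySem.Dict.modify, PySem.Dict.ofList, PySem.Dict.empty, PySem.Dict.update,
        PySem.Dict.insert, PySem.Dict.contains, PySem.Dict.get?, PySem.Dict.getD]

-- A's inline heading test equals B's helper (the keyword lists are permutations)
theorem pvHeading_eq (stripped : String) :
    (let lower := pvRstripColon (PySem.Str.lower stripped)
     if pvKeywordsA.contains lower then true
     else if pvIsupper stripped && decide (2 < PySem.Str.len stripped) &&
             decide (PySem.Str.len stripped < 60) &&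
             decide ((PySem.Str.split₀ stripped).length ≤ 7) then true
     else if pvKeywordsA.contains lower then true
     else if decide ((PySem.Str.split₀ stripped).length ≤ 7) then
       pvKeywordsA.any (fun kw => PySem.Str.isIn kw lower && decide (PySem.Str.len lower < 50))
     else false) = pvIsHeadingB stripped := by
  simp only [pvIsHeadingB, pvContains_eq, pvAny_eq]
  split_ifs <;> rfl

-- proof-side vocabulary: A's finish step, A's current as (heading?, content parts), flush

def pvFinish (st : List (List (String × String)) × Option (PySem.Dict String String)) :
    List (List (String × String)) :=
  match st.2 with
  | some cur => if cur.items = [] then st.1 else st.1 ++ [cur.items]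
  | none => st.1

def pvToCur (h : Option String) (c : List String) : Option (PySem.Dict String String) :=
  if h = none ∧ c = [] then none
  else some (PySem.Dict.ofList
    [("heading", h.getD "__HEADER__"), ("content", PySem.Str.join "" c)])

def pvFlush (sections : List (List (String × String))) (heading : Option String)
    (content : List String) : List (List (String × String)) :=
  if heading.isSome || !content.isEmpty then
    sections ++ [[("heading", heading.getD "__HEADER__"), ("content", PySem.Str.join "" content)]]
  else sections

-- the stripped non-empty lines both programs work over
def pvL (lines : List String) : List String :=
  (lines.filter (fun l => !((PySem.Str.strip l).toList.isEmpty))).map PySem.Str.strip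

theorem pvFlush_toCur (secs : List (List (String × String))) (h : Option String)
    (c : List String) : pvFinish (secs, pvToCur h c) = pvFlush secs h c := by
  unfold pvFinish pvToCur pvFlush
  by_cases hc : h = none ∧ c = []
  · simp [hc]
  · cases h <;> simp_all [pvItems_ofList]

theorem pvFlush_some (S : List (List (String × String))) (H : String) (body : List String) :
    pvFlush S (some H) (body.map (· ++ "\n")) = S ++ [pvSection H body] := by
  simp [pvFlush, pvSection]

-- shifting the enumerate start commutes with find? of an index-blind predicate
theorem pvFind_enum_shift (t : List String) (s : Int) :
    (PySem.List.enumerate t (s + 1)).find? (fun q => pvIsHeadingB q.2)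
    = ((PySem.List.enumerate t s).find? (fun q => pvIsHeadingB q.2)).map
        (fun q => (q.1 + 1, q.2)) := by
  induction t generalizing s with
  | nil => simp [PySem.List.enumerate_nil]
  | cons a t ih =>
    rw [PySem.List.enumerate_cons, PySem.List.enumerate_cons]
    by_cases ha : pvIsHeadingB a
    · simp [ha]
    · simp only [List.find?_cons, ha]
      exact ih (s + 1)

-- pvSpan is structurally the span at the first heading
theorem pvSpan_cons (x : String) (t : List String) :
    pvSpan (x :: t)
    = if pvIsHeadingB x then ([], x :: t) else (x :: (pvSpan t).1, (pvSpan t).2) := by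
  unfold pvSpan
  rw [show PySem.List.enumerate (x :: t) = PySem.List.enumerate (x :: t) 0 from rfl,
      PySem.List.enumerate_cons]
  by_cases hx : pvIsHeadingB x
  · simp only [List.find?_cons, hx]
    rw [show (0 : Int) = ((0 : Nat) : Int) by simp,
        PySem.List.slice_to_natCast, PySem.List.slice_from_natCast]
    simp
  · simp only [List.find?_cons, hx]
    rw [show (0 : Int) + 1 = 0 + 1 from rfl, pvFind_enum_shift t 0]
    rcases hf : (PySem.List.enumerate t 0).find? (fun q => pvIsHeadingB q.2) with _ | ⟨i, a⟩
    · simp only [hf, Option.map_none]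
      simp
    · have hm := List.mem_of_find?_eq_some hf
      rw [PySem.List.mem_enumerate_iff] at hm
      obtain ⟨k, hk, hpair⟩ := hm
      have hik : i = (k : Int) := by
        have := congrArg Prod.fst hpair; simpa using this
      subst hik
      simp only [hf, Option.map_some]
      have h1 : (PySem.List.slice (x :: t) none (some ((k : Int) + 1)))
          = x :: PySem.List.slice t none (some (k : Int)) := by
        have hc : ((k : Int) + 1) = ((k + 1 : Nat) : Int) := by push_cast; ring
        rw [hc, PySem.List.slice_to_natCast, PySem.List.slice_to_natCast, List.take_succ_cons]
      have h2 : (PySem.List.slice (x :: t) (some ((k : Int) + 1)) none)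
          = PySem.List.slice t (some (k : Int)) none := by
        have hc : ((k : Int) + 1) = ((k + 1 : Nat) : Int) := by push_cast; ring
        rw [hc, PySem.List.slice_from_natCast, PySem.List.slice_from_natCast, List.drop_succ_cons]
      rw [h1, h2]
      simp

theorem pvSpan_nil : pvSpan ([] : List String) = ([], []) := by
  simp [pvSpan, PySem.List.enumerate_nil]

theorem pvWhileRest_cons (head : String) (tail : List String) :
    pvWhileRest (head :: tail)
    = pvSection (pvRstripColon head) (pvSpan tail).1 :: pvWhileRest (pvSpan tail).2 := by
  rw [pvWhileRest]

-- the bridge invariant: A's finished fold from state (secs, heading?, content parts)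
-- equals flushing the pending section extended by the next heading-free chunk,
-- then B's chunk-at-a-time consumption of the remainder
theorem pvLoop (lines : List String) (secs : List (List (String × String)))
    (h : Option String) (c : List String) :
    pvFinish (lines.foldl pvAStep (secs, pvToCur h c))
    = pvFlush secs h (c ++ (pvSpan (pvL lines)).1.map (· ++ "\n"))
      ++ pvWhileRest (pvSpan (pvL lines)).2 := by
  induction lines generalizing secs h c with
  | nil =>
    simp only [List.foldl_nil, pvL, List.filter_nil, List.map_nil, pvSpan_nil, List.map_nil,
      List.append_nil, pvWhileRest, List.append_nil]
    exact pvFlush_toCur secs h c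
  | cons l t ih =>
    by_cases hl : PySem.Chars.strip l.toList = []
    · have hstep : pvAStep (secs, pvToCur h c) l = (secs, pvToCur h c) := by
        simp [pvAStep, hl]
      have hL : pvL (l :: t) = pvL t := by
        simp [pvL, hl]
      rw [List.foldl_cons, hstep, hL, ih]
    · have hl' : ¬((PySem.Str.strip l).toList = []) := by simpa using hl
      have hL : pvL (l :: t) = PySem.Str.strip l :: pvL t := by
        simp [pvL, hl]
      by_cases hh : pvIsHeadingB (PySem.Str.strip l) = true
      · have hstep : pvAStep (secs, pvToCur h c) l
            = (pvFlush secs h c, pvToCur (some (pvRstripColon (PySem.Str.strip l))) []) := by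
          simp only [pvAStep, PySem.Str.toList_strip, if_neg hl, pvHeading_eq, hh, if_true,
            pvToCur]
          exact Prod.ext (pvFlush_toCur secs h c) rfl
        rw [List.foldl_cons, hstep, hL, pvSpan_cons, if_pos hh,
            ih (pvFlush secs h c) (some (pvRstripColon (PySem.Str.strip l))) [],
            pvWhileRest_cons]
        simp [pvFlush_some]
      · have hh' : pvIsHeadingB (PySem.Str.strip l) = false := by simpa using hh
        have hstep : pvAStep (secs, pvToCur h c) l
            = (secs, pvToCur h (c ++ [PySem.Str.strip l ++ "\n"])) := by
          simp only [pvAStep, PySem.Str.toList_strip, if_neg hl, pvHeading_eq, hh',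
            Bool.false_eq_true, if_false]
          by_cases hc : h = none ∧ c = []
          · simp [pvToCur, hc, pvModify_content, pvJoin_singleton]
          · cases hO : h <;>
              simp_all [pvToCur, pvModify_content, pvJoin_snoc, String.append_assoc]
        rw [List.foldl_cons, hstep, hL, pvSpan_cons, if_neg (by simp [hh']),
            ih secs h (c ++ [PySem.Str.strip l ++ "\n"])]
        simp [List.append_assoc]

-- ===== VERDICT =====

theorem parse_input_cv_sections_spec : Claim_equal_parse_input_cv_sections := by
  intro full_text _
  unfold Spec_parse_input_cv_sections
  have hA : parse_input_cv_sections full_text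
      = pvFinish (((PySem.Str.split? full_text "\n").getD []).foldl pvAStep ([], none)) := rfl
  have hB : parse_input_cv_sections_alt full_text
      = (if !(pvSpan (pvL ((PySem.Str.split? full_text "\n").getD []))).1.isEmpty then
           [pvSection "__HEADER__" (pvSpan (pvL ((PySem.Str.split? full_text "\n").getD []))).1]
         else [])
        ++ pvWhileRest (pvSpan (pvL ((PySem.Str.split? full_text "\n").getD []))).2 := rfl
  have key := pvLoop ((PySem.Str.split? full_text "\n").getD []) [] none []
  simp only [List.nil_append] at key
  rw [hA, hB, show (none : Option (PySem.Dict String String)) = pvToCur none [] from rfl, key]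
  congr 1
  rcases hsp : (pvSpan (pvL ((PySem.Str.split? full_text "\n").getD []))).1 with _ | ⟨a, b⟩
  · simp [pvFlush]
  · simp [pvFlush, pvSection]
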